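-- pv_equiv track=rewrite | github.com/RAIRLab/bloxorz | bloxorz/gen_pddl_3.py | build_adjacencies
-- ===== SOURCE A (Python) =====
-- from typing import Dict, List, Set, Tuple
--
-- Coord = Tuple[int, int]
--
-- def build_adjacencies(tiles: Set[Coord]) -> Tuple[List[Tuple[str, str, str]], List[Tuple[str, str, str]]]:
--     """
--     Build directed adjacency lists:
--       horizontal: list of (tile_a, tile_b, 'east' or 'west')
--       vertical:   list of (tile_a, tile_b, 'south' or 'north')
--     We only generate east and south (forward) and mirror them as west/north.
--     """
--     tile_set = set(tiles)
--     # We'll fill these in the caller once we know the tile naming width.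
--     # Here we only compute coordinate pairs.
--     east_edges: List[Tuple[Coord, Coord]] = []
--     south_edges: List[Tuple[Coord, Coord]] = []
--
--     for (r, c) in sorted(tile_set):
--         if (r, c + 1) in tile_set:
--             east_edges.append(((r, c), (r, c + 1)))
--         if (r + 1, c) in tile_set:
--             south_edges.append(((r, c), (r + 1, c)))
--
--     return east_edges, south_edges
-- ===== SOURCE B (Python) =====
-- from typing import List, Set, Tuple
--
-- Coord = Tuple[int, int]
--
-- def build_adjacencies(tiles: Set[Coord]) -> Tuple[List[Tuple[Coord, Coord]], List[Tuple[Coord, Coord]]]: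
--     # Sort once row-major: a tile's east neighbour, if present, is the very next
--     # element, so east edges fall out of an adjacent-pair scan with no membership test.
--     rm = sorted(set(tiles))
--     east_edges = [(a, b) for a, b in zip(rm, rm[1:]) if b == (a[0], a[1] + 1)]
--     # Same trick column-major for south neighbours, then restore row-major source order.
--     cm = sorted(set(tiles), key=lambda t: (t[1], t[0]))
--     south_sources = [a for a, b in zip(cm, cm[1:]) if b == (a[0] + 1, a[1])]
--     south_edges = [((r, c), (r + 1, c)) for (r, c) in sorted(south_sources)]
--     return east_edges, south_edges
-- ===== Notes on version B (the rewrite author's own statement) =====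
-- stated objective: alternative
-- what changed: Instead of testing each sorted tile's east/south neighbour for set membership, B sorts the tile set row-major and column-major and reads edges off adjacent pairs of each sorted list (a neighbour, when present, is the next element), with no membership tests at all.
import Mathlib
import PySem

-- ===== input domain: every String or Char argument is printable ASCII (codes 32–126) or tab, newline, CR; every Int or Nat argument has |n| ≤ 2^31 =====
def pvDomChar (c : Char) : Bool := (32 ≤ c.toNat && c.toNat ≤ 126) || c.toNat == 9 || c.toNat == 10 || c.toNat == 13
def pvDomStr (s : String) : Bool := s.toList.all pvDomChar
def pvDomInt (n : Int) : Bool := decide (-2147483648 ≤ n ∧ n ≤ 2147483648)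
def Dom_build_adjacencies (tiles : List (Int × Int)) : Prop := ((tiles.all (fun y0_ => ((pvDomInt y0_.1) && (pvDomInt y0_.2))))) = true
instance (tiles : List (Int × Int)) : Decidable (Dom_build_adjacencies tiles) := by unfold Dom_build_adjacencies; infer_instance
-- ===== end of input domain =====

-- B drops A's per-tile membership tests: it sorts the tile set row-major and column-major
-- and reads edges off ADJACENT PAIRS of each sorted list (an east/south neighbour, when it
-- exists, is the very next element); alternative algorithm, same asymptotic cost.

-- ===== PORT A =====
def build_adjacencies (tiles : List (Int × Int)) : (List ((Int × Int) × (Int × Int))) × (List ((Int × Int) × (Int × Int))) :=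
  let tile_set : PySem.Set (Int × Int) := PySem.Set.ofList tiles
  let east_edges : List ((Int × Int) × (Int × Int)) := []
  let south_edges : List ((Int × Int) × (Int × Int)) := []
  (PySem.List.sorted2 tile_set Prod.fst Prod.snd).foldl
    (fun acc rc =>
      let acc1 := if PySem.Set.contains tile_set (rc.1, rc.2 + 1) then acc.1 ++ [((rc.1, rc.2), (rc.1, rc.2 + 1))] else acc.1
      let acc2 := if PySem.Set.contains tile_set (rc.1 + 1, rc.2) then acc.2 ++ [((rc.1, rc.2), (rc.1 + 1, rc.2))] else acc.2
      (acc1, acc2))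
    (east_edges, south_edges)

-- ===== PORT B =====
-- 'for a, b in zip(l, l[1:]) if b == succ(a)': scan of adjacent pairs keeping the sources
def pvAdjScan (succ : (Int × Int) → (Int × Int)) : List (Int × Int) → List (Int × Int)
  | [] => []
  | [_] => []
  | a :: b :: t => (if b = succ a then [a] else []) ++ pvAdjScan succ (b :: t)

-- The Python set comprehension iterates tiles in hash order, but both passes sort it first,
-- so building the sorted lists from the canonical element list is exact.
def build_adjacencies_alt (tiles : List (Int × Int)) : (List ((Int × Int) × (Int × Int))) × (List ((Int × Int) × (Int × Int))) :=
  let rm := PySem.List.sorted2 (PySem.Set.ofList tiles : PySem.Set (Int × Int)) Prod.fst Prod.snd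
  let east_edges := (pvAdjScan (fun a => (a.1, a.2 + 1)) rm).map (fun a => (a, (a.1, a.2 + 1)))
  let cm := PySem.List.sorted2 (PySem.Set.ofList tiles : PySem.Set (Int × Int)) Prod.snd Prod.fst
  let south_sources := pvAdjScan (fun a => (a.1 + 1, a.2)) cm
  let south_edges := (PySem.List.sorted2 south_sources Prod.fst Prod.snd).map (fun rc => ((rc.1, rc.2), (rc.1 + 1, rc.2)))
  (east_edges, south_edges)

-- ===== PRECONDITION & SPEC =====
def Spec_build_adjacencies (tiles : List (Int × Int)) (out : (List ((Int × Int) × (Int × Int))) × (List ((Int × Int) × (Int × Int)))) : Prop := out = build_adjacencies_alt tiles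
instance (tiles : List (Int × Int)) (out : (List ((Int × Int) × (Int × Int))) × (List ((Int × Int) × (Int × Int)))) : Decidable (Spec_build_adjacencies tiles out) := by unfold Spec_build_adjacencies; infer_instance

-- ===== CLAIM (what is proved, stated in full; the proofs are below) =====
def Claim_equal_build_adjacencies : Prop := ∀ (tiles : List (Int × Int)), Dom_build_adjacencies tiles → Spec_build_adjacencies tiles (build_adjacencies tiles)

-- ===== LEMMAS AND PROOFS =====

-- the comparator sorted2 … k1 k2 sorts with (lexicographic on the two integer keys)
def pvKLt (k1 k2 : (Int × Int) → Int) (a b : Int × Int) : Bool :=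
  decide (k1 a < k1 b) || (!decide (k1 b < k1 a) && decide (k2 a < k2 b))

theorem pvKLt_true_iff (k1 k2 : (Int × Int) → Int) (a b : Int × Int) :
    pvKLt k1 k2 a b = true ↔ k1 a < k1 b ∨ (k1 a = k1 b ∧ k2 a < k2 b) := by
  simp only [pvKLt, Bool.or_eq_true, Bool.and_eq_true, Bool.not_eq_true', decide_eq_true_eq,
    decide_eq_false_iff_not]
  omega

theorem pvKLt_false_iff (k1 k2 : (Int × Int) → Int) (a b : Int × Int) :
    pvKLt k1 k2 a b = false ↔ ¬(k1 a < k1 b ∨ (k1 a = k1 b ∧ k2 a < k2 b)) := by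
  rw [Bool.eq_false_iff, ne_eq, pvKLt_true_iff]

theorem sorted2_eq_foldl (k1 k2 : (Int × Int) → Int) (xs : List (Int × Int)) :
    PySem.List.sorted2 xs k1 k2
      = xs.foldl (fun acc x => PySem.List.insertBy (pvKLt k1 k2) x acc) [] := rfl

theorem pairwise_insertBy (k1 k2 : (Int × Int) → Int) (x : Int × Int) (ys : List (Int × Int))
    (h : ys.Pairwise (fun a b => pvKLt k1 k2 b a = false)) :
    (PySem.List.insertBy (pvKLt k1 k2) x ys).Pairwise (fun a b => pvKLt k1 k2 b a = false) := by
  induction ys with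
  | nil => simp [PySem.List.insertBy]
  | cons y ys ih =>
      rw [List.pairwise_cons] at h
      by_cases hxy : pvKLt k1 k2 x y = true
      · simp only [PySem.List.insertBy, hxy, if_pos]
        refine List.Pairwise.cons ?_ (List.Pairwise.cons h.1 h.2)
        intro z hz
        rw [List.mem_cons] at hz
        have hxy' := (pvKLt_true_iff k1 k2 x y).mp hxy
        rcases hz with rfl | hz
        · rw [pvKLt_false_iff]; omega
        · have hyz := h.1 z hz
          rw [pvKLt_false_iff] at hyz ⊢
          omega
      · have hxy' : pvKLt k1 k2 x y = false := (Bool.eq_false_iff (b := pvKLt k1 k2 x y)).mpr hxy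
        simp only [PySem.List.insertBy, hxy', Bool.false_eq_true, if_false]
        refine List.Pairwise.cons ?_ (ih h.2)
        intro z hz
        rw [PySem.List.mem_insertBy] at hz
        rcases hz with rfl | hz
        · exact hxy'
        · exact h.1 z hz

theorem pairwise_foldl_insertBy (k1 k2 : (Int × Int) → Int) (xs acc : List (Int × Int))
    (h : acc.Pairwise (fun a b => pvKLt k1 k2 b a = false)) :
    (xs.foldl (fun acc x => PySem.List.insertBy (pvKLt k1 k2) x acc) acc).Pairwise
      (fun a b => pvKLt k1 k2 b a = false) := by
  induction xs generalizing acc with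
  | nil => simpa
  | cons x xs ih => exact ih _ (pairwise_insertBy k1 k2 x acc h)

theorem sorted2_pairwise (k1 k2 : (Int × Int) → Int) (xs : List (Int × Int)) :
    (PySem.List.sorted2 xs k1 k2).Pairwise (fun a b => pvKLt k1 k2 b a = false) := by
  rw [sorted2_eq_foldl]
  exact pairwise_foldl_insertBy k1 k2 xs [] List.Pairwise.nil

-- on a NODUP list with injective key pair, the non-strict pairwise order is strict
theorem pairwise_strict (k1 k2 : (Int × Int) → Int)
    (hinj : ∀ a b : Int × Int, k1 a = k1 b → k2 a = k2 b → a = b)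
    (l : List (Int × Int)) (hnd : l.Nodup)
    (hp : l.Pairwise (fun a b => pvKLt k1 k2 b a = false)) :
    l.Pairwise (fun a b => pvKLt k1 k2 a b = true) := by
  refine (hnd.and hp).imp ?_
  rintro a b ⟨hne, hf⟩
  rw [pvKLt_false_iff] at hf
  rw [pvKLt_true_iff]
  by_cases h1 : k1 a = k1 b
  · by_cases h2 : k2 a = k2 b
    · exact absurd (hinj a b h1 h2) hne
    · omega
  · omega

-- the adjacent-pair scan on a strictly sorted list finds exactly the members whose successor is a member
theorem scan_eq_filter (k1 k2 : (Int × Int) → Int) (succ : (Int × Int) → (Int × Int))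
    (hs : ∀ a, pvKLt k1 k2 a (succ a) = true)
    (hb : ∀ a b, pvKLt k1 k2 a b = true → pvKLt k1 k2 b (succ a) = true → False) :
    ∀ l : List (Int × Int), l.Pairwise (fun a b => pvKLt k1 k2 a b = true) →
      pvAdjScan succ l = l.filter (fun a => decide (succ a ∈ l)) := by
  have hasym : ∀ a b : Int × Int, pvKLt k1 k2 a b = true → pvKLt k1 k2 b a = true → False := by
    intro a b h1 h2
    rw [pvKLt_true_iff] at h1 h2; omega
  intro l
  induction l with
  | nil => intro _; rfl
  | cons a tl ih =>
      intro hp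
      rw [List.pairwise_cons] at hp
      obtain ⟨ha, htl⟩ := hp
      cases tl with
      | nil =>
          have hne : ¬ succ a = a := fun h => hasym a (succ a) (hs a) (by simpa [h] using hs a)
          simp [pvAdjScan, hne]
      | cons b t =>
          have hab : pvKLt k1 k2 a b = true := ha b (List.mem_cons_self ..)
          -- succ a ∈ a :: b :: t ↔ b = succ a
          have hpa : (succ a ∈ a :: b :: t) ↔ b = succ a := by
            constructor
            · intro h
              rcases List.mem_cons.mp h with h | h
              · exfalso; exact hasym a (succ a) (hs a) (by simpa [h] using hs a)
              · rcases List.mem_cons.mp h with h | h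
                · exact h.symm
                · exfalso
                  rw [List.pairwise_cons] at htl
                  exact hb a b hab (htl.1 (succ a) h)
            · intro h
              exact List.mem_cons_of_mem _ (h ▸ List.mem_cons_self ..)
          -- for members of the tail the head never matters
          have htail : (b :: t).filter (fun x => decide (succ x ∈ a :: b :: t))
              = (b :: t).filter (fun x => decide (succ x ∈ b :: t)) := by
            apply List.filter_congr
            intro x hx
            simp only [decide_eq_decide]
            constructor
            · intro h
              rcases List.mem_cons.mp h with h | h
              · exfalso
                exact hasym x (succ x) (hs x) (by simpa [h] using ha x hx)
              · exact h
            · intro h; exact List.mem_cons_of_mem _ h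
          have hstep := ih htl
          show (if b = succ a then [a] else []) ++ pvAdjScan succ (b :: t) = _
          by_cases hba : b = succ a
          · have hfa : (decide (succ a ∈ a :: b :: t)) = true := decide_eq_true (hpa.mpr hba)
            rw [List.filter_cons, if_pos hfa, if_pos hba, htail, ← hstep]
            rfl
          · have hfa : (decide (succ a ∈ a :: b :: t)) = false := by
              simp only [decide_eq_false_iff_not]
              exact fun h => hba (hpa.mp h)
            rw [List.filter_cons, hfa]
            simp only [Bool.false_eq_true, if_false]
            rw [if_neg hba, htail, ← hstep]
            rfl

-- sorting a filtered list = filtering the sorted list (row-major keys are jointly injective)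
theorem sorted2_filter (l : List (Int × Int)) (q : Int × Int → Bool) :
    PySem.List.sorted2 (l.filter q) Prod.fst Prod.snd
      = (PySem.List.sorted2 l Prod.fst Prod.snd).filter q := by
  refine List.Perm.eq_of_pairwise ?_ (sorted2_pairwise _ _ _) ((sorted2_pairwise _ _ l).filter q) ?_
  · intro a b _ _ hab hba
    rw [pvKLt_false_iff] at hab hba
    have h1 : a.1 = b.1 := by omega
    have h2 : a.2 = b.2 := by omega
    exact Prod.ext h1 h2
  · exact (PySem.List.sorted2_perm _ _ _ _).trans
      (((PySem.List.sorted2_perm l Prod.fst Prod.snd false).filter q).symm)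

-- A's two append-branches fold is the pair of filter-then-map passes
theorem foldl_two_append (S : List (Int × Int)) (p q : (Int × Int) → Bool)
    (f g : (Int × Int) → ((Int × Int) × (Int × Int))) :
    S.foldl (fun acc rc => (if p rc then acc.1 ++ [f rc] else acc.1, if q rc then acc.2 ++ [g rc] else acc.2)) ([], [])
      = ((S.filter p).map f, (S.filter q).map g) := by
  rw [PySem.List.foldl_prod_mk (f := fun a rc => if p rc then a ++ [f rc] else a)
      (g := fun a rc => if q rc then a ++ [g rc] else a)]
  rw [PySem.List.foldl_append_if, PySem.List.foldl_append_if]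
  simp

-- two sorts with jointly injective keys of the same multiset agree
theorem sorted2_of_perm (l m : List (Int × Int)) (h : l.Perm m) :
    PySem.List.sorted2 l Prod.fst Prod.snd = PySem.List.sorted2 m Prod.fst Prod.snd := by
  refine List.Perm.eq_of_pairwise ?_ (sorted2_pairwise _ _ _) (sorted2_pairwise _ _ _) ?_
  · intro a b _ _ hab hba
    rw [pvKLt_false_iff] at hab hba
    have h1 : a.1 = b.1 := by omega
    have h2 : a.2 = b.2 := by omega
    exact Prod.ext h1 h2
  · exact (PySem.List.sorted2_perm _ _ _ _).trans
      (h.trans (PySem.List.sorted2_perm m Prod.fst Prod.snd false).symm)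

-- ===== VERDICT (by name: the statement is the Claim_ definition above) =====
theorem build_adjacencies_spec : Claim_equal_build_adjacencies := by
  intro tiles _
  show build_adjacencies tiles = build_adjacencies_alt tiles
  unfold build_adjacencies build_adjacencies_alt
  simp only []
  set ts : PySem.Set (Int × Int) := PySem.Set.ofList tiles with hts
  have hnd : (ts : List (Int × Int)).Nodup := PySem.Set.nodup_ofList tiles
  set rm := PySem.List.sorted2 (ts : List (Int × Int)) Prod.fst Prod.snd with hrm
  set cm := PySem.List.sorted2 (ts : List (Int × Int)) Prod.snd Prod.fst with hcm
  have hrmperm : rm.Perm (ts : List (Int × Int)) := PySem.List.sorted2_perm _ _ _ _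
  have hcmperm : cm.Perm (ts : List (Int × Int)) := PySem.List.sorted2_perm _ _ _ _
  -- membership in the sorted lists = Set.contains
  have hmem : ∀ (l : List (Int × Int)), l.Perm (ts : List (Int × Int)) →
      ∀ y : Int × Int, decide (y ∈ l) = PySem.Set.contains ts y := by
    intro l hl y
    show _ = List.contains _ y
    rw [Bool.eq_iff_iff]
    simp only [List.contains_iff_mem, decide_eq_true_eq]
    exact hl.mem_iff
  -- A's fold is a pair of filter-and-map passes over rm
  rw [foldl_two_append rm
      (p := fun rc => PySem.Set.contains ts (rc.1, rc.2 + 1))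
      (q := fun rc => PySem.Set.contains ts (rc.1 + 1, rc.2))]
  -- east: the adjacent-pair scan of rm is the east filter
  have hrmstrict : rm.Pairwise (fun a b => pvKLt Prod.fst Prod.snd a b = true) :=
    pairwise_strict _ _ (fun a b h1 h2 => Prod.ext h1 h2) rm
      (hrmperm.nodup_iff.mpr hnd) (sorted2_pairwise _ _ _)
  have hE : pvAdjScan (fun a => (a.1, a.2 + 1)) rm
      = rm.filter (fun rc => PySem.Set.contains ts (rc.1, rc.2 + 1)) := by
    rw [scan_eq_filter Prod.fst Prod.snd (fun a => (a.1, a.2 + 1))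
        (by intro a; rw [pvKLt_true_iff]; simp)
        (by intro a b h1 h2; rw [pvKLt_true_iff] at h1 h2; simp at h1 h2; omega)
        rm hrmstrict]
    exact List.filter_congr (fun x _ => hmem rm hrmperm (x.1, x.2 + 1))
  -- south: the adjacent-pair scan of cm is the south filter over cm
  have hcmstrict : cm.Pairwise (fun a b => pvKLt Prod.snd Prod.fst a b = true) :=
    pairwise_strict _ _ (fun a b h1 h2 => Prod.ext h2 h1) cm
      (hcmperm.nodup_iff.mpr hnd) (sorted2_pairwise _ _ _)
  have hS : pvAdjScan (fun a => (a.1 + 1, a.2)) cm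
      = cm.filter (fun rc => PySem.Set.contains ts (rc.1 + 1, rc.2)) := by
    rw [scan_eq_filter Prod.snd Prod.fst (fun a => (a.1 + 1, a.2))
        (by intro a; rw [pvKLt_true_iff]; simp)
        (by intro a b h1 h2; rw [pvKLt_true_iff] at h1 h2; simp at h1 h2; omega)
        cm hcmstrict]
    exact List.filter_congr (fun x _ => hmem cm hcmperm (x.1 + 1, x.2))
  rw [hE, hS, sorted2_filter, sorted2_of_perm cm (ts : List (Int × Int)) hcmperm, ← hrm]
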